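-- pv_equiv track=rewrite | github.com/mbjackson-capp/adventofcode | 2015/day15.py | bake_cookie
-- ===== SOURCE A (Python) =====
-- from typing import Tuple
--
-- def bake_cookie(ingredients: dict, partition: Tuple[int]) -> dict:
--     """Return a dictionary representation of a cookie and its numeric properties."""
--     zippy = zip(ingredients.items(), partition)
--     cookie = {}
--     for ing in zippy:
--         properties, amt = ing
--         prop_dict = properties[1]
--         for prop, qty in prop_dict.items():
--             if prop not in cookie:
--                 cookie[prop] = 0
--             cookie[prop] += amt * qty
--     for prop in cookie:
--         if cookie[prop] < 0:
--             cookie[prop] = 0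
--     return cookie
-- ===== SOURCE B (Python) =====
-- def bake_cookie(ingredients, partition):
--     """Return a dictionary representation of a cookie and its numeric properties."""
--     pairs = list(zip(ingredients.values(), partition))
--     props = dict.fromkeys(p for pd, _ in pairs for p in pd)
--     return {p: max(0, sum(amt * pd.get(p, 0) for pd, amt in pairs)) for p in props}
-- ===== Notes on version B (the rewrite author's own statement) =====
-- stated objective: alternative
-- what changed: B is property-major: it collects the property names of the consumed (zip-truncated) ingredients once, then computes each property's clamped weighted sum in one reducing pass, instead of A's ingredient-major accumulation into a dict followed by a separate clamp pass; Pre_ only excludes association lists with duplicate keys inside an inner property dict, which no Python dict argument can represent.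
import Mathlib
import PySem

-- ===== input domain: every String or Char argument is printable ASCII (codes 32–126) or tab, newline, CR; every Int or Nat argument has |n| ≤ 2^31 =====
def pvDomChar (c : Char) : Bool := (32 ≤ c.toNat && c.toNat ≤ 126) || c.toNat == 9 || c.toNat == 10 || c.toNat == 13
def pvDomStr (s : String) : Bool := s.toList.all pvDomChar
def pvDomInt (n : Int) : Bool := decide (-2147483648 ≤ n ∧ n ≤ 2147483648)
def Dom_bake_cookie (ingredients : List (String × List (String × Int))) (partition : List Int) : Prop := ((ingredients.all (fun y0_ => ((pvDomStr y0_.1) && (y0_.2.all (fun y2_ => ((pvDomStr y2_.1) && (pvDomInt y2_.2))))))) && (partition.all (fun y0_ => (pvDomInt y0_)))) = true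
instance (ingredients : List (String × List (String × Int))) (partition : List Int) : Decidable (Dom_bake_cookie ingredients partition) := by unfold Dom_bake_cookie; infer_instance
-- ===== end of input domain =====

-- B is property-major (collect the consumed properties once, then one clamped
-- weighted-sum pass per property) instead of A's ingredient-major dict
-- accumulation followed by a clamp pass; objective: alternative decomposition.

-- ===== PORT A =====
def bake_cookie (ingredients : List (String × List (String × Int))) (partition : List Int) : List (String × Int) :=
  let zippy := List.zip ingredients partition
  let cookie : PySem.Dict String Int :=
    zippy.foldl (fun cookie ing =>
      let amt := ing.2
      let prop_dict := ing.1.2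
      prop_dict.foldl (fun cookie pq =>
        let cookie := if cookie.contains pq.1 then cookie else cookie.insert pq.1 0
        cookie.insert pq.1 (cookie.getD pq.1 0 + amt * pq.2)) cookie)
      PySem.Dict.empty
  let cookie :=
    cookie.keys.foldl (fun cookie prop =>
      if cookie.getD prop 0 < 0 then cookie.insert prop 0 else cookie) cookie
  cookie.items

-- ===== PORT B =====
def bake_cookie_alt (ingredients : List (String × List (String × Int))) (partition : List Int) : List (String × Int) :=
  let pairs := List.zip (ingredients.map Prod.snd) partition
  let props : PySem.Set String := PySem.Set.ofList (pairs.flatMap (fun pr => pr.1.map Prod.fst))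
  props.map (fun p =>
    (p, max 0 (pairs.foldl (fun s pr => s + pr.2 * (PySem.Dict.mk pr.1).getD p 0) 0)))

-- ===== PRECONDITION & SPEC =====
-- Pre_ excludes association lists with duplicate keys inside an ingredient's
-- property dict: the dict-typed argument's list representation is ambiguous
-- there (Python's dict collapses the duplicates before either function runs).
def Pre_bake_cookie (ingredients : List (String × List (String × Int))) (partition : List Int) : Prop :=
  ∀ pr ∈ ingredients, (pr.2.map Prod.fst).Nodup
instance (ingredients : List (String × List (String × Int))) (partition : List Int) : Decidable (Pre_bake_cookie ingredients partition) := by unfold Pre_bake_cookie; infer_instance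

def pvWitness_bake_cookie : (List (String × List (String × Int))) × List Int :=
  ([("butter", [("cap", 2), ("dur", -3)]), ("sugar", [("dur", 5)])], [2, 1])

def Spec_bake_cookie (ingredients : List (String × List (String × Int))) (partition : List Int) (out : List (String × Int)) : Prop := out = bake_cookie_alt ingredients partition
instance (ingredients : List (String × List (String × Int))) (partition : List Int) (out : List (String × Int)) : Decidable (Spec_bake_cookie ingredients partition out) := by unfold Spec_bake_cookie; infer_instance

-- ===== CLAIM (what is proved, stated in full; the proofs are below) =====
def Claim_equal_bake_cookie : Prop := ∀ (ingredients : List (String × List (String × Int))) (partition : List Int), Dom_bake_cookie ingredients partition → Pre_bake_cookie ingredients partition → Spec_bake_cookie ingredients partition (bake_cookie ingredients partition)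

-- ===== LEMMAS AND PROOFS =====

-- sum of the values of all entries of pd whose key is p (what A adds per unit amount)
def pvSlook (pd : List (String × Int)) (p : String) : Int :=
  ((pd.filter (fun pq => pq.1 == p)).map Prod.snd).sum

-- total weighted contribution of a list of (prop_dict, amount) pairs to property p
def pvTotals (L : List (List (String × Int) × Int)) (p : String) : Int :=
  (L.map (fun pr => pr.2 * pvSlook pr.1 p)).sum

theorem pvSlook_nil (p : String) : pvSlook [] p = 0 := rfl

theorem pvSlook_cons (k : String) (v : Int) (t : List (String × Int)) (p : String) :
    pvSlook ((k, v) :: t) p = if k == p then v + pvSlook t p else pvSlook t p := by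
  simp only [pvSlook, List.filter_cons]
  by_cases h : k == p <;> simp [h]

theorem pvSlook_of_not_mem (t : List (String × Int)) (p : String)
    (h : p ∉ t.map Prod.fst) : pvSlook t p = 0 := by
  induction t with
  | nil => rfl
  | cons hd tl ih =>
    obtain ⟨k, v⟩ := hd
    rw [pvSlook_cons]
    simp only [List.map_cons, List.mem_cons, not_or] at h
    rw [if_neg (fun hk => h.1 (Eq.symm (by simpa using hk))), ih h.2]

-- under unique keys, A's per-entry accumulation equals B's dict lookup
theorem pvSlook_eq_getD (pd : List (String × Int)) (p : String)
    (h : (pd.map Prod.fst).Nodup) : pvSlook pd p = (PySem.Dict.mk pd).getD p 0 := by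
  induction pd with
  | nil => rfl
  | cons hd tl ih =>
    obtain ⟨k, v⟩ := hd
    simp only [List.map_cons, List.nodup_cons] at h
    rw [pvSlook_cons, PySem.Dict.getD_eq_get?_getD, PySem.Dict.get?_mk_cons]
    by_cases hk : k == p
    · have hkp : k = p := by simpa using hk
      have hnm : p ∉ tl.map Prod.fst := hkp ▸ h.1
      rw [if_pos hk, if_pos hk]
      simp [pvSlook_of_not_mem tl p hnm]
    · rw [if_neg hk, if_neg hk, ih h.2, PySem.Dict.getD_eq_get?_getD]

-- A's inner body is a single insert-accumulate
theorem pvInnerStep (d : PySem.Dict String Int) (p : String) (q amt : Int) :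
    (let d' := if d.contains p then d else d.insert p 0;
     d'.insert p (d'.getD p 0 + amt * q)) = d.insert p (d.getD p 0 + amt * q) := by
  by_cases h : d.contains p
  · simp [h]
  · simp only [h, Bool.false_eq_true, if_false]
    rw [PySem.Dict.getD_insert_self, PySem.Dict.insert_insert_self,
      PySem.Dict.getD_of_not_contains _ _ (by simpa using h)]

-- getD through A's inner fold
theorem pvInner_getD (pd : List (String × Int)) (amt : Int) (d : PySem.Dict String Int) (p : String) :
    (pd.foldl (fun d pq => d.insert pq.1 (d.getD pq.1 0 + amt * pq.2)) d).getD p 0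
      = d.getD p 0 + amt * pvSlook pd p := by
  induction pd generalizing d with
  | nil => simp [pvSlook_nil]
  | cons hd tl ih =>
    obtain ⟨k, v⟩ := hd
    rw [List.foldl_cons, ih, pvSlook_cons, PySem.Dict.getD_insert]
    by_cases hk : k == p
    · have hkp : k = p := by simpa using hk
      subst hkp
      simp only [hk, if_true]
      ring
    · rw [if_neg hk, if_neg (fun hpk => hk (by simp [hpk]))]

-- A's outer loop body, with the inner body rewritten via pvInnerStep
def pvStep (d : PySem.Dict String Int) (pr : List (String × Int) × Int) : PySem.Dict String Int :=
  pr.1.foldl (fun d pq => d.insert pq.1 (d.getD pq.1 0 + pr.2 * pq.2)) d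

theorem pvOuter_getD (L : List (List (String × Int) × Int)) (d : PySem.Dict String Int) (p : String) :
    (L.foldl pvStep d).getD p 0 = d.getD p 0 + pvTotals L p := by
  induction L generalizing d with
  | nil => simp [pvTotals]
  | cons hd tl ih =>
    rw [List.foldl_cons, ih, pvStep, pvInner_getD]
    simp [pvTotals]
    ring

theorem pvOuter_keys (L : List (List (String × Int) × Int)) (d : PySem.Dict String Int) :
    (L.foldl pvStep d).keys = PySem.Set.update d.keys (L.flatMap (fun pr => pr.1.map Prod.fst)) := by
  induction L generalizing d with
  | nil => simp [PySem.Set.update_nil]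
  | cons hd tl ih =>
    rw [List.foldl_cons, ih, pvStep, PySem.Dict.keys_foldl_insert_key,
      List.flatMap_cons, PySem.Set.update_append]

theorem pvOuter_nodup (L : List (List (String × Int) × Int)) (d : PySem.Dict String Int)
    (h : d.keys.Nodup) : (L.foldl pvStep d).keys.Nodup := by
  induction L generalizing d with
  | nil => exact h
  | cons hd tl ih =>
    exact ih _ (PySem.Dict.nodup_keys_foldl_insert_key _ _ _ _ h)

-- the clamp loop: value of every key after the pass
theorem pvClamp_getD (ks : List String) (d : PySem.Dict String Int) (p : String)
    (h : ks.Nodup) :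
    (ks.foldl (fun d prop => if d.getD prop 0 < 0 then d.insert prop 0 else d) d).getD p 0
      = if p ∈ ks then max 0 (d.getD p 0) else d.getD p 0 := by
  induction ks generalizing d with
  | nil => simp
  | cons k t ih =>
    simp only [List.nodup_cons] at h
    rw [List.foldl_cons]
    by_cases hpk : p = k
    · subst hpk
      rw [show (if p ∈ p :: t then max 0 (d.getD p 0) else d.getD p 0) = max 0 (d.getD p 0) by simp]
      by_cases hneg : d.getD p 0 < 0
      · rw [if_pos hneg, ih _ h.2, if_neg h.1, PySem.Dict.getD_insert_self]
        omega
      · rw [if_neg hneg, ih _ h.2, if_neg h.1]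
        omega
    · rw [ih _ h.2]
      by_cases hneg : d.getD k 0 < 0
      · rw [if_pos hneg, PySem.Dict.getD_insert, if_neg hpk]
        simp [hpk]
      · simp [hneg, hpk]

theorem pvClamp_keys (ks : List String) (d : PySem.Dict String Int)
    (h : ∀ k ∈ ks, d.contains k = true) :
    (ks.foldl (fun d prop => if d.getD prop 0 < 0 then d.insert prop 0 else d) d).keys = d.keys := by
  induction ks generalizing d with
  | nil => rfl
  | cons k t ih =>
    rw [List.foldl_cons]
    by_cases hneg : d.getD k 0 < 0
    · rw [if_pos hneg, ih]
      · exact PySem.Dict.keys_insert_of_contains _ _ (h k (by simp))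
      · intro x hx
        rw [PySem.Dict.contains_insert]
        simp [h x (List.mem_cons_of_mem _ hx)]
    · rw [if_neg hneg]
      exact ih _ (fun x hx => h x (List.mem_cons_of_mem _ hx))

-- B's reducing pass computes pvTotals (under unique keys of each consumed prop_dict)
theorem pvB_sum (L : List (List (String × Int) × Int)) (s : Int) (p : String)
    (h : ∀ pr ∈ L, (pr.1.map Prod.fst).Nodup) :
    L.foldl (fun s pr => s + pr.2 * (PySem.Dict.mk pr.1).getD p 0) s = s + pvTotals L p := by
  induction L generalizing s with
  | nil => simp [pvTotals]
  | cons hd tl ih =>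
    rw [List.foldl_cons, ih _ (fun pr hpr => h pr (List.mem_cons_of_mem _ hpr)),
      ← pvSlook_eq_getD _ _ (h hd (by simp))]
    simp [pvTotals]
    ring

-- ===== VERDICT (by name: the statement is the Claim_ definition above) =====
theorem bake_cookie_spec : Claim_equal_bake_cookie := by
  intro ings part _ hpre
  show bake_cookie ings part = bake_cookie_alt ings part
  unfold bake_cookie bake_cookie_alt
  dsimp only
  -- identify the two zipped lists
  have hzip : List.zip (ings.map Prod.snd) part
      = (List.zip ings part).map (fun pr => (pr.1.2, pr.2)) := by
    rw [List.zip_map_left]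
    rfl
  set L : List (List (String × Int) × Int) := (List.zip ings part).map (fun pr => (pr.1.2, pr.2)) with hL
  have hnodupL : ∀ pr ∈ L, (pr.1.map Prod.fst).Nodup := by
    intro pr hpr
    rw [hL] at hpr
    obtain ⟨q, hq, rfl⟩ := List.mem_map.mp hpr
    exact hpre q.1 (List.of_mem_zip hq).1
  -- A's accumulation loop is a fold of pvStep over L
  have hfoldA : (List.zip ings part).foldl (fun cookie ing =>
      ing.1.2.foldl (fun cookie pq =>
        let cookie := if cookie.contains pq.1 then cookie else cookie.insert pq.1 0
        cookie.insert pq.1 (cookie.getD pq.1 0 + ing.2 * pq.2)) cookie)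
      PySem.Dict.empty = L.foldl pvStep PySem.Dict.empty := by
    rw [hL, List.foldl_map]
    apply PySem.List.foldl_congr_mem
    intro d pr _
    apply PySem.List.foldl_congr_mem
    intro d' pq _
    exact pvInnerStep d' pq.1 pq.2 pr.2
  rw [hfoldA]
  set d0 := L.foldl pvStep PySem.Dict.empty with hd0
  have hkeys0 : d0.keys = PySem.Set.ofList (L.flatMap (fun pr => pr.1.map Prod.fst)) := by
    rw [hd0, pvOuter_keys]
    simp [PySem.Set.update_nil_left]
  have hnodup0 : d0.keys.Nodup := pvOuter_nodup _ _ (by simp)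
  have hget0 : ∀ p, d0.getD p 0 = pvTotals L p := by
    intro p
    rw [hd0, pvOuter_getD]
    simp
  set d1 := d0.keys.foldl (fun cookie prop =>
      if cookie.getD prop 0 < 0 then cookie.insert prop 0 else cookie) d0 with hd1
  have hkeys1 : d1.keys = d0.keys := by
    rw [hd1]
    exact pvClamp_keys _ _ (fun k hk => by
      rw [PySem.Dict.contains_iff_mem_keys] at *
      exact hk)
  have hnodup1 : d1.keys.Nodup := hkeys1 ▸ hnodup0
  rw [PySem.Dict.items_eq_map_keys d1 hnodup1 0, hkeys1, hkeys0, hzip]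
  apply List.map_congr_left
  intro p hp
  have hpk : p ∈ d0.keys := by rw [hkeys0]; exact hp
  rw [hd1, pvClamp_getD _ _ _ hnodup0, if_pos hpk, hget0,
    pvB_sum L 0 p hnodupL]
  simp
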